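-- pv_equiv track=rewrite | github.com/intercepted16/pymupdf4llm-C | pymupdf4llm/new_table.py | cells_to_tables
-- ===== SOURCE A (Python) =====
-- def cells_to_tables(page, cells) -> list:
--     """
--     Given a list of bounding boxes (`cells`), return a list of tables that
--     hold those cells most simply (and contiguously).
--     """
--
--     def bbox_to_corners(bbox) -> tuple:
--         return (
--             (bbox[0], bbox[1]),  # top-left
--             (bbox[2], bbox[1]),  # top-right
--             (bbox[2], bbox[3]),  # bottom-right
--             (bbox[0], bbox[3]),  # bottom-left
--         )
--
--     remaining_cells = list(cells)
--
--     # Iterate through the cells found above, and assign them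
--     # to contiguous tables
--
--     current_corners = set()
--     current_cells = []
--
--     tables = []
--     while len(remaining_cells):
--         if len(current_cells) == 0:
--             current_cells.append(remaining_cells.pop(0))
--             current_corners = set(bbox_to_corners(current_cells[0]))
--         else:
--             found_neighbor = False
--             for i, cell in enumerate(remaining_cells):
--                 cell_corners = set(bbox_to_corners(cell))
--                 if len(current_corners & cell_corners):
--                     current_cells.append(remaining_cells.pop(i))
--                     current_corners |= cell_corners
--                     found_neighbor = True
--                     break
--
--             if not found_neighbor:
--                 tables.append(current_cells)
--                 current_cells = []
--                 current_corners = set()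
--
--     # Once we have exhausting the list of cells ...
--
--     # ... and we have a cell group that has not been stored
--     if len(current_cells):
--         tables.append(current_cells)
--
--     # PyMuPDF modification:
--     # Remove tables without text or having only 1 column
--     for i in range(len(tables) - 1, -1, -1):
--         table_cells = tables[i]
--         if len(table_cells) < 2:
--             tables.pop(i)
--             continue
--
--         # Check if table has at least 2 columns by looking at unique x-coordinates
--         x_coords = set()
--         for cell in table_cells:
--             x_coords.add(cell[0])  # x0
--
--         if len(x_coords) < 2:
--             tables.pop(i)
--
--     # Sort the tables top-to-bottom-left-to-right based on the value of the
--     # topmost-and-then-leftmost coordinate of a table.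
--     _sorted = sorted(tables, key=lambda t: min((c[1], c[0]) for c in t))
--     return _sorted
-- ===== SOURCE B (Python) =====
-- import heapq
--
--
-- def cells_to_tables(page, cells) -> list:
--     """
--     Same result as A: group cells into corner-connected components (cells
--     collected in min-original-index flood-fill order, which matches A's
--     rescan-from-the-front greedy), drop groups with <2 cells or <2 distinct
--     x0, sort groups by their topmost-then-leftmost (y, x) coordinate.
--     Uses a corner->indices map plus an index min-heap instead of A's
--     repeated scans of the remaining-cell list.
--     """
--     def corners(c):
--         return ((c[0], c[1]), (c[2], c[1]), (c[2], c[3]), (c[0], c[3]))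
--
--     corner_map = {}
--     for idx, c in enumerate(cells):
--         for p in corners(c):
--             corner_map.setdefault(p, []).append(idx)
--
--     n = len(cells)
--     seen = set()
--     groups = []
--     for s in range(n):
--         if s in seen:
--             continue
--         seen.add(s)
--         heap = [s]
--         group = []
--         while heap:
--             i = heapq.heappop(heap)
--             group.append(cells[i])
--             for p in corners(cells[i]):
--                 for j in corner_map[p]:
--                     if j not in seen:
--                         seen.add(j)
--                         heapq.heappush(heap, j)
--         groups.append(group)
--
--     tables = [
--         t for t in groups
--         if len(t) >= 2 and len({c[0] for c in t}) >= 2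
--     ]
--
--     return sorted(tables, key=lambda t: min((c[1], c[0]) for c in t))
-- ===== Notes on version B (the rewrite author's own statement) =====
-- stated objective: faster
-- what changed: Replaces A's repeated rescans of the remaining-cell list (pop the first cell whose corner set meets the group's corners, restart the scan after every hit) and its backward pop-based filter loop by a corner->indices map built once plus a min-heap flood fill over indices (popping the smallest original index reproduces A's rescan-from-the-front order exactly) and a filter comprehension.
import Mathlib
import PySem

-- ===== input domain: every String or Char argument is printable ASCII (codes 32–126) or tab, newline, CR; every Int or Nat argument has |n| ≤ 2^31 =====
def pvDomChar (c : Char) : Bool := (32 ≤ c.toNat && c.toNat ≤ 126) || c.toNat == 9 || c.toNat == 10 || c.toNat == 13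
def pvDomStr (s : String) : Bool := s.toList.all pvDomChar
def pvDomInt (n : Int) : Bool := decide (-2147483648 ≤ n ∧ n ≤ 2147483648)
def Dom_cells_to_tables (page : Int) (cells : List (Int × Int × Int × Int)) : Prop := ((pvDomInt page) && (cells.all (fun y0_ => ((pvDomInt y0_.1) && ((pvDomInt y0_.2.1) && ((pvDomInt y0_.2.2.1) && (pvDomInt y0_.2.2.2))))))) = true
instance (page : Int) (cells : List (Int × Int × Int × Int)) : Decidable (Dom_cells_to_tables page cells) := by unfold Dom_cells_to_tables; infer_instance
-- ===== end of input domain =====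

-- B replaces A's quadratic rescans of the remaining-cell list by a corner->indices
-- map plus a min-heap flood fill over original indices (same values, same order);
-- objective: faster.

abbrev Cell4 := Int × Int × Int × Int

-- corners of a bbox (both Pythons define the same local helper)
def corners4 (c : Cell4) : List (Int × Int) :=
  [(c.1, c.2.1), (c.2.2.1, c.2.1), (c.2.2.1, c.2.2.2), (c.1, c.2.2.2)]

-- ===== PORT A =====

-- `len(current_corners & cell_corners) != 0`
def sharesCorner (U : PySem.Set (Int × Int)) (c : Cell4) : Bool :=
  PySem.Set.len (PySem.Set.inter U (PySem.Set.ofList (corners4 c))) != 0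

-- the `for i, cell in enumerate(remaining_cells): ... break` scan
def findNbrA (U : PySem.Set (Int × Int)) : List Cell4 → Nat → Option Nat
  | [], _ => none
  | c :: rest, i => if sharesCorner U c then some i else findNbrA U rest (i + 1)

-- the `while len(remaining_cells)` loop; returns (tables, current_cells)
def loopA : List Cell4 → List Cell4 → PySem.Set (Int × Int) → List (List Cell4) → (List (List Cell4) × List Cell4)
  | [], cur, _, tables => (tables, cur)
  | c0 :: rest, cur, U, tables =>
    if hcur : cur = [] then
      loopA rest [c0] (PySem.Set.ofList (corners4 c0)) tables
    else
      match hf : findNbrA U (c0 :: rest) 0 with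
      | some i =>
        match hp : PySem.List.pop? (c0 :: rest) (i : Int) with
        | some (cell, rem') =>
          loopA rem' (cur ++ [cell]) (PySem.Set.union U (PySem.Set.ofList (corners4 cell))) tables
        | none => (tables, cur)   -- unreachable: findNbrA returns an in-range position
      | none => loopA (c0 :: rest) [] PySem.Set.empty (tables ++ [cur])
termination_by rem cur _ _ => 2 * rem.length + (if cur = [] then 0 else 1)
decreasing_by
  · simp; omega
  · have h := PySem.List.length_of_pop?_eq_some _ hp
    simp at h ⊢
    omega
  · simp [hcur]

-- post-loop `if len(current_cells): tables.append(current_cells)`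
def finishA (r : List (List Cell4) × List Cell4) : List (List Cell4) :=
  if r.2.length ≠ 0 then r.1 ++ [r.2] else r.1

-- the x_coords set built by the inner `for cell in table_cells` loop
def xCoordsA (t : List Cell4) : PySem.Set Int :=
  t.foldl (fun s c => PySem.Set.add s c.1) PySem.Set.empty

-- the backward `for i in range(len(tables)-1, -1, -1)` pop loop
-- (tables.pop(i) at an in-range i is eraseIdx; the popped value is unused)
def filterA : List (List Cell4) → Nat → List (List Cell4)
  | tables, 0 => tables
  | tables, i + 1 =>
    let t := tables.getD i []
    if t.length < 2 then filterA (tables.eraseIdx i) i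
    else if PySem.Set.len (xCoordsA t) < 2 then filterA (tables.eraseIdx i) i
    else filterA tables i

-- sort key `min((c[1], c[0]) for c in t)` (Python min raises on an empty table;
-- tables are nonempty here, the `none` default is never read)
def keyY (t : List Cell4) : Int :=
  match PySem.List.min2? t (fun c => c.2.1) (fun c => c.1) with
  | some c => c.2.1
  | none => 0
def keyX (t : List Cell4) : Int :=
  match PySem.List.min2? t (fun c => c.2.1) (fun c => c.1) with
  | some c => c.1
  | none => 0

def cells_to_tables (page : Int) (cells : List (Int × Int × Int × Int)) : List (List (Int × Int × Int × Int)) :=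
  let r := loopA cells [] PySem.Set.empty []
  let tables := finishA r
  let tables2 := filterA tables tables.length
  PySem.List.sorted2 tables2 keyY keyX

-- ===== PORT B =====

-- cells[i] (every index handed around comes from enumerate/range, hence in range)
def cellAt (cells : List Cell4) (i : Nat) : Cell4 := cells.getD i (0, 0, 0, 0)

-- functional model of heapq: the heap's observable content in pop order
def heapPush : List Nat → Nat → List Nat
  | [], j => [j]
  | x :: xs, j => if j ≤ x then j :: x :: xs else x :: heapPush xs j

-- `if j not in seen: seen.add(j); heappush(heap, j)`
def pushOne (hs : List Nat × PySem.Set Nat) (j : Nat) : List Nat × PySem.Set Nat :=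
  if PySem.Set.contains hs.2 j then hs else (heapPush hs.1 j, PySem.Set.add hs.2 j)

-- `for p in corners(cells[i]): for j in corner_map[p]: ...`
def pushAll (cmap : PySem.Dict (Int × Int) (List Nat)) (c : Cell4) (hs : List Nat × PySem.Set Nat) :
    List Nat × PySem.Set Nat :=
  (corners4 c).foldl (fun hs p => (PySem.Dict.getD cmap p []).foldl pushOne hs) hs

-- `corner_map.setdefault(p, []).append(idx)` over `enumerate(cells)`
def cmapB (cells : List Cell4) : PySem.Dict (Int × Int) (List Nat) :=
  (List.range cells.length).foldl
    (fun d i => (corners4 (cellAt cells i)).foldl (fun d p => PySem.Dict.modify d p [] (fun l => l ++ [i])) d)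
    PySem.Dict.empty

-- the `while heap` flood fill (fuel = cells.length suffices: every pop is a distinct index)
def floodB (cmap : PySem.Dict (Int × Int) (List Nat)) (cells : List Cell4) :
    Nat → List Nat → PySem.Set Nat → List Cell4 → (List Cell4 × PySem.Set Nat)
  | 0, _, seen, group => (group, seen)
  | _ + 1, [], seen, group => (group, seen)
  | fuel + 1, i :: heap, seen, group =>
    let c := cellAt cells i
    let hs := pushAll cmap c (heap, seen)
    floodB cmap cells fuel hs.1 hs.2 (group ++ [c])

-- the `for s in range(n)` seed loop
def outerB (cmap : PySem.Dict (Int × Int) (List Nat)) (cells : List Cell4) :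
    List Nat → PySem.Set Nat → List (List Cell4) → List (List Cell4)
  | [], _, groups => groups
  | s :: ss, seen, groups =>
    if PySem.Set.contains seen s then outerB cmap cells ss seen groups
    else
      let r := floodB cmap cells cells.length [s] (PySem.Set.add seen s) []
      outerB cmap cells ss r.2 (groups ++ [r.1])

-- `len(t) >= 2 and len({c[0] for c in t}) >= 2`
def goodB (t : List Cell4) : Bool :=
  decide (2 ≤ t.length) && decide (2 ≤ (PySem.Set.ofList (t.map (fun c => c.1))).length)

def cells_to_tables_alt (page : Int) (cells : List (Int × Int × Int × Int)) : List (List (Int × Int × Int × Int)) :=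
  let cmap := cmapB cells
  let groups := outerB cmap cells (List.range cells.length) PySem.Set.empty []
  let tables := groups.filter goodB
  PySem.List.sorted2 tables keyY keyX

-- ===== PRECONDITION & SPEC =====
def Spec_cells_to_tables (page : Int) (cells : List (Int × Int × Int × Int)) (out : List (List (Int × Int × Int × Int))) : Prop := out = cells_to_tables_alt page cells
instance (page : Int) (cells : List (Int × Int × Int × Int)) (out : List (List (Int × Int × Int × Int))) : Decidable (Spec_cells_to_tables page cells out) := by unfold Spec_cells_to_tables; infer_instance

-- ===== CLAIM (what is proved, stated in full; the proofs are below) =====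
def Claim_equal_cells_to_tables : Prop := ∀ (page : Int) (cells : List (Int × Int × Int × Int)), Dom_cells_to_tables page cells → Spec_cells_to_tables page cells (cells_to_tables page cells)

-- ===== LEMMAS AND PROOFS =====

-- ---- small set/list facts ----

theorem set_contains_iff {α : Type} [BEq α] [LawfulBEq α] (s : PySem.Set α) (x : α) :
    PySem.Set.contains s x = true ↔ x ∈ s := by
  simp [PySem.Set.contains]

theorem contains_empty {α : Type} [BEq α] (x : α) :
    PySem.Set.contains (PySem.Set.empty : PySem.Set α) x = false := rfl

theorem contains_add_iff {α : Type} [BEq α] [LawfulBEq α] (s : PySem.Set α) (j x : α) :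
    PySem.Set.contains (PySem.Set.add s j) x = true ↔ (x = j ∨ PySem.Set.contains s x = true) := by
  rw [set_contains_iff, PySem.Set.mem_add, set_contains_iff]; tauto

theorem sharesCorner_iff (U : PySem.Set (Int × Int)) (c : Cell4) :
    sharesCorner U c = true ↔ ∃ q ∈ corners4 c, q ∈ U := by
  unfold sharesCorner
  rw [bne_iff_ne]
  have hlen : PySem.Set.len (PySem.Set.inter U (PySem.Set.ofList (corners4 c))) ≠ 0 ↔
      PySem.Set.inter U (PySem.Set.ofList (corners4 c)) ≠ [] := by
    simp [PySem.Set.len]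
  rw [hlen]
  constructor
  · intro hne
    obtain ⟨x, hx⟩ := List.exists_mem_of_ne_nil _ hne
    obtain ⟨hxU, hxC⟩ := (PySem.Set.mem_inter _ _ _).1 hx
    exact ⟨x, (PySem.Set.mem_ofList _ _).1 hxC, hxU⟩
  · rintro ⟨q, h1, h2⟩ heq
    have : q ∈ PySem.Set.inter U (PySem.Set.ofList (corners4 c)) :=
      (PySem.Set.mem_inter _ _ _).2 ⟨h2, (PySem.Set.mem_ofList _ _).2 h1⟩
    rw [heq] at this
    simp at this

theorem sharesCorner_union_iff (U V : PySem.Set (Int × Int)) (c : Cell4) :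
    sharesCorner (PySem.Set.union U V) c = true ↔
      (sharesCorner U c = true ∨ sharesCorner V c = true) := by
  simp only [sharesCorner_iff, PySem.Set.mem_union]
  constructor
  · rintro ⟨q, h1, h2 | h2⟩
    · exact Or.inl ⟨q, h1, h2⟩
    · exact Or.inr ⟨q, h1, h2⟩
  · rintro (⟨q, h1, h2⟩ | ⟨q, h1, h2⟩)
    · exact ⟨q, h1, Or.inl h2⟩
    · exact ⟨q, h1, Or.inr h2⟩

theorem mem_heapPush (h : List Nat) (j x : Nat) : x ∈ heapPush h j ↔ (x = j ∨ x ∈ h) := by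
  induction h with
  | nil => simp [heapPush]
  | cons a t ih =>
    simp only [heapPush]
    split
    · simp [List.mem_cons]
    · simp [List.mem_cons, ih]; tauto

theorem pairwise_heapPush (h : List Nat) (j : Nat) (hp : h.Pairwise (· < ·)) (hj : j ∉ h) :
    (heapPush h j).Pairwise (· < ·) := by
  induction h with
  | nil => simp [heapPush]
  | cons a t ih =>
    rw [List.pairwise_cons] at hp
    obtain ⟨ha, ht⟩ := hp
    simp only [heapPush]
    split
    · rename_i hle
      have hja : j < a := lt_of_le_of_ne hle (by simp at hj; tauto)
      refine List.pairwise_cons.2 ⟨?_, List.pairwise_cons.2 ⟨ha, ht⟩⟩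
      intro b hb
      rcases List.mem_cons.1 hb with rfl | hbt
      · exact hja
      · exact hja.trans (ha _ hbt)
    · rename_i hgt
      have haj : a < j := by omega
      refine List.pairwise_cons.2 ⟨?_, ih ht (by simp at hj; tauto)⟩
      intro b hb
      rcases (mem_heapPush t j b).1 hb with rfl | hbt
      · exact haj
      · exact ha _ hbt

theorem eq_of_sorted_lt {l l' : List Nat} (h : l.Pairwise (· < ·)) (h' : l'.Pairwise (· < ·))
    (hm : ∀ x, x ∈ l ↔ x ∈ l') : l = l' :=
  List.Perm.eq_of_pairwise (fun a b _ _ hab hba => absurd hba (Nat.lt_asymm hab)) h h'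
    ((List.perm_ext_iff_of_nodup (h.imp ne_of_lt) (h'.imp ne_of_lt)).mpr hm)

theorem mem_eraseIdx_sorted {l : List Nat} (hp : l.Pairwise (· < ·)) {p : Nat}
    (hplen : p < l.length) (x : Nat) :
    x ∈ l.eraseIdx p ↔ (x ∈ l ∧ x ≠ l[p]) := by
  have hdec : l = l.take p ++ l[p] :: l.drop (p + 1) := by
    rw [List.getElem_cons_drop, List.take_append_drop]
  have hnd : (l.take p ++ l[p] :: l.drop (p + 1)).Nodup := by
    rw [← hdec]; exact hp.imp ne_of_lt
  rw [List.nodup_append, List.nodup_cons] at hnd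
  obtain ⟨hnd1, ⟨hnd2, hnd3⟩, hdisj⟩ := hnd
  have hnotin1 : l[p] ∉ l.take p := by
    intro hmem
    exact hdisj _ hmem _ List.mem_cons_self rfl
  rw [List.eraseIdx_eq_take_drop_succ]
  constructor
  · intro hx
    rcases List.mem_append.1 hx with hx1 | hx2
    · refine ⟨by rw [hdec]; exact List.mem_append_left _ hx1, fun hxe => ?_⟩
      exact hnotin1 (hxe ▸ hx1)
    · refine ⟨by rw [hdec]; exact List.mem_append_right _ (List.mem_cons_of_mem _ hx2), fun hxe => ?_⟩
      exact hnd2 (hxe ▸ hx2)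
  · rintro ⟨hxl, hxne⟩
    rw [hdec] at hxl
    rcases List.mem_append.1 hxl with hx1 | hx2
    · exact List.mem_append_left _ hx1
    · rcases List.mem_cons.1 hx2 with rfl | hx3
      · exact absurd rfl hxne
      · exact List.mem_append_right _ hx3

theorem filter_cons_first {P : Nat → Bool} {j : Nat} {hs : List Nat} :
    ∀ {l : List Nat}, l.filter P = j :: hs →
    ∃ p : Nat, l.findIdx? P = some p ∧ ∃ hlt : p < l.length, l[p] = j ∧ (l.eraseIdx p).filter P = hs := by
  intro l
  induction l with
  | nil => intro hf; simp at hf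
  | cons a t ih =>
    intro hf
    by_cases hpa : P a = true
    · rw [List.filter_cons_of_pos hpa] at hf
      have h1 : a = j := (List.cons.inj hf).1
      have h2 : t.filter P = hs := (List.cons.inj hf).2
      exact ⟨0, by simp [List.findIdx?_cons, hpa], by simp, by simpa using h1, by simpa using h2⟩
    · rw [List.filter_cons_of_neg (by simpa using hpa)] at hf
      obtain ⟨p, h1, hlt, h2, h3⟩ := ih hf
      refine ⟨p + 1, ?_, by simpa using Nat.succ_lt_succ hlt, by simpa using h2, ?_⟩
      · simp [List.findIdx?_cons, hpa, h1]
      · rw [List.eraseIdx_cons_succ, List.filter_cons_of_neg (by simpa using hpa), h3]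

-- ---- port A: scan and loop shape ----

theorem findNbrA_eq (U : PySem.Set (Int × Int)) :
    ∀ (rem : List Cell4) (k : Nat),
      findNbrA U rem k = (rem.findIdx? (fun c => sharesCorner U c)).map (· + k) := by
  intro rem
  induction rem with
  | nil => intro k; simp [findNbrA]
  | cons c rest ih =>
    intro k
    simp only [findNbrA, List.findIdx?_cons]
    by_cases hc : sharesCorner U c = true
    · simp [hc]
    · simp only [hc, if_false, Bool.false_eq_true, ih (k + 1), Option.map_map]
      cases rest.findIdx? (fun c => sharesCorner U c) <;> simp <;> omega

theorem findNbrA_zero (U : PySem.Set (Int × Int)) (rem : List Cell4) :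
    findNbrA U rem 0 = rem.findIdx? (fun c => sharesCorner U c) := by
  rw [findNbrA_eq]
  cases rem.findIdx? (fun c => sharesCorner U c) <;> simp

theorem loopA_nil (cur : List Cell4) (U : PySem.Set (Int × Int)) (tables : List (List Cell4)) :
    loopA [] cur U tables = (tables, cur) := by
  rw [loopA]

theorem loopA_seed (c0 : Cell4) (rest : List Cell4) (U : PySem.Set (Int × Int))
    (tables : List (List Cell4)) :
    loopA (c0 :: rest) [] U tables = loopA rest [c0] (PySem.Set.ofList (corners4 c0)) tables := by
  rw [loopA]; simp

theorem loopA_found {c0 : Cell4} {rest cur : List Cell4} {U : PySem.Set (Int × Int)}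
    {tables : List (List Cell4)} {p : Nat} {cell : Cell4} {rem' : List Cell4}
    (hcur : cur ≠ []) (hf : findNbrA U (c0 :: rest) 0 = some p)
    (hp : PySem.List.pop? (c0 :: rest) (p : Int) = some (cell, rem')) :
    loopA (c0 :: rest) cur U tables =
      loopA rem' (cur ++ [cell]) (PySem.Set.union U (PySem.Set.ofList (corners4 cell))) tables := by
  rw [loopA, dif_neg hcur]
  split
  · rename_i i heq
    rw [hf] at heq
    injection heq with heq
    subst heq
    split
    · rename_i cell' rem'' heq2
      rw [hp] at heq2
      injection heq2 with heq2
      injection heq2 with heq2a heq2b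
      subst heq2a; subst heq2b
      rfl
    · rename_i heq2
      rw [hp] at heq2
      simp at heq2
  · rename_i heq
    rw [hf] at heq
    simp at heq

theorem loopA_none {c0 : Cell4} {rest cur : List Cell4} {U : PySem.Set (Int × Int)}
    {tables : List (List Cell4)} (hcur : cur ≠ [])
    (hf : findNbrA U (c0 :: rest) 0 = none) :
    loopA (c0 :: rest) cur U tables = loopA (c0 :: rest) [] PySem.Set.empty (tables ++ [cur]) := by
  rw [loopA, dif_neg hcur]
  split
  · rename_i i heq
    rw [hf] at heq
    simp at heq
  · rfl

-- ---- port B: corner map, push fold, flood equations ----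

theorem mem_foldl_corners (i : Nat) :
    ∀ (ps : List (Int × Int)) (d : PySem.Dict (Int × Int) (List Nat)) (x : Nat) (p : Int × Int),
      x ∈ PySem.Dict.getD (ps.foldl (fun d q => PySem.Dict.modify d q [] (fun l => l ++ [i])) d) p [] ↔
        (x ∈ PySem.Dict.getD d p [] ∨ (x = i ∧ p ∈ ps)) := by
  intro ps
  induction ps with
  | nil => intro d x p; simp
  | cons q qs ih =>
    intro d x p
    rw [List.foldl_cons, ih]
    by_cases hpq : p = q
    · subst hpq
      rw [PySem.Dict.getD_modify_self]
      simp [List.mem_append]; tauto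
    · rw [PySem.Dict.getD_modify_of_ne _ _ _ hpq]
      simp [hpq]

theorem mem_getD_cmap (cells : List Cell4) (x : Nat) (p : Int × Int) :
    x ∈ PySem.Dict.getD (cmapB cells) p [] ↔
      (x < cells.length ∧ p ∈ corners4 (cellAt cells x)) := by
  unfold cmapB
  suffices h : ∀ m : Nat,
      x ∈ PySem.Dict.getD ((List.range m).foldl
        (fun d i => (corners4 (cellAt cells i)).foldl
          (fun d p => PySem.Dict.modify d p [] (fun l => l ++ [i])) d) PySem.Dict.empty) p [] ↔
      (x < m ∧ p ∈ corners4 (cellAt cells x)) by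
    exact h cells.length
  intro m
  induction m with
  | zero => simp [PySem.Dict.getD, PySem.Dict.empty, PySem.Dict.get?]
  | succ m ih =>
    rw [List.range_succ, List.foldl_append, List.foldl_cons, List.foldl_nil, mem_foldl_corners, ih]
    constructor
    · rintro (⟨h1, h2⟩ | ⟨rfl, h2⟩)
      · exact ⟨by omega, h2⟩
      · exact ⟨by omega, h2⟩
    · rintro ⟨h1, h2⟩
      rcases Nat.lt_succ_iff_lt_or_eq.1 h1 with h | rfl
      · exact Or.inl ⟨h, h2⟩
      · exact Or.inr ⟨rfl, h2⟩

theorem pushFold :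
    ∀ (js : List Nat) (h : List Nat) (s : PySem.Set Nat),
      h.Pairwise (· < ·) → (∀ x ∈ h, PySem.Set.contains s x = true) →
      (js.foldl pushOne (h, s)).1.Pairwise (· < ·) ∧
      (∀ x, x ∈ (js.foldl pushOne (h, s)).1 ↔
        (x ∈ h ∨ (x ∈ js ∧ PySem.Set.contains s x = false))) ∧
      (∀ x, PySem.Set.contains (js.foldl pushOne (h, s)).2 x = true ↔
        (PySem.Set.contains s x = true ∨ x ∈ js)) ∧
      (∀ x ∈ (js.foldl pushOne (h, s)).1, PySem.Set.contains (js.foldl pushOne (h, s)).2 x = true) := by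
  intro js
  induction js with
  | nil =>
    intro h s hp hsub
    refine ⟨hp, by simp, by simp, hsub⟩
  | cons j js ih =>
    intro h s hp hsub
    simp only [List.foldl_cons]
    by_cases hc : PySem.Set.contains s j = true
    · have hcm : j ∈ s := (set_contains_iff s j).1 hc
      rw [show pushOne (h, s) j = (h, s) by simp [pushOne, set_contains_iff, hcm]]
      obtain ⟨A1, A2, A3, A4⟩ := ih h s hp hsub
      refine ⟨A1, ?_, ?_, A4⟩
      · intro x
        rw [A2 x]
        constructor
        · rintro (h1 | ⟨h1, h2⟩)
          · exact Or.inl h1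
          · exact Or.inr ⟨List.mem_cons_of_mem _ h1, h2⟩
        · rintro (h1 | ⟨h1, h2⟩)
          · exact Or.inl h1
          · rcases List.mem_cons.1 h1 with rfl | h3
            · rw [hc] at h2; cases h2
            · exact Or.inr ⟨h3, h2⟩
      · intro x
        rw [A3 x]
        constructor
        · rintro (h1 | h1)
          · exact Or.inl h1
          · exact Or.inr (List.mem_cons_of_mem _ h1)
        · rintro (h1 | h1)
          · exact Or.inl h1
          · rcases List.mem_cons.1 h1 with rfl | h3
            · exact Or.inl hc
            · exact Or.inr h3
    · have hcm : j ∉ s := fun m => hc ((set_contains_iff s j).2 m)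
      rw [show pushOne (h, s) j = (heapPush h j, PySem.Set.add s j) by
        simp [pushOne, set_contains_iff, hcm]]
      have hjh : j ∉ h := fun hmem => hc (hsub j hmem)
      have hp' := pairwise_heapPush h j hp hjh
      have hsub' : ∀ x ∈ heapPush h j, PySem.Set.contains (PySem.Set.add s j) x = true := by
        intro x hx
        rcases (mem_heapPush h j x).1 hx with he | hxh
        · exact (contains_add_iff s j x).2 (Or.inl he)
        · exact (contains_add_iff s j x).2 (Or.inr (hsub x hxh))
      obtain ⟨A1, A2, A3, A4⟩ := ih _ _ hp' hsub'
      refine ⟨A1, ?_, ?_, A4⟩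
      · intro x
        rw [A2 x, mem_heapPush]
        have hadd := contains_add_iff s j x
        constructor
        · rintro ((rfl | h1) | ⟨h1, h2⟩)
          · refine Or.inr ⟨List.mem_cons_self, ?_⟩
            rw [Bool.eq_false_iff]
            exact hc
          · exact Or.inl h1
          · have h2' : ¬(x = j ∨ PySem.Set.contains s x = true) := by
              intro hor
              have := hadd.2 hor
              rw [h2] at this
              cases this
            have h2a : x ≠ j := fun he => h2' (Or.inl he)
            have h2b : PySem.Set.contains s x = false := by
              rw [Bool.eq_false_iff]
              exact fun he => h2' (Or.inr he)
            exact Or.inr ⟨List.mem_cons_of_mem _ h1, h2b⟩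
        · rintro (h1 | ⟨h1, h2⟩)
          · exact Or.inl (Or.inr h1)
          · rcases List.mem_cons.1 h1 with rfl | h3
            · exact Or.inl (Or.inl rfl)
            · by_cases hxj : x = j
              · exact Or.inl (Or.inl hxj)
              · refine Or.inr ⟨h3, ?_⟩
                rw [Bool.eq_false_iff]
                intro hcon
                rcases hadd.1 hcon with h4 | h4
                · exact hxj h4
                · rw [h4] at h2
                  cases h2
      · intro x
        rw [A3 x, contains_add_iff]
        constructor
        · rintro ((rfl | h1) | h1)
          · exact Or.inr List.mem_cons_self
          · exact Or.inl h1
          · exact Or.inr (List.mem_cons_of_mem _ h1)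
        · rintro (h1 | h1)
          · exact Or.inl (Or.inr h1)
          · rcases List.mem_cons.1 h1 with rfl | h3
            · exact Or.inl (Or.inl rfl)
            · exact Or.inr h3

theorem pushAll_flat (cmap : PySem.Dict (Int × Int) (List Nat)) (c : Cell4)
    (hs : List Nat × PySem.Set Nat) :
    pushAll cmap c hs =
      ((corners4 c).flatMap (fun q => PySem.Dict.getD cmap q [])).foldl pushOne hs := by
  rw [List.foldl_flatMap]; rfl

theorem floodB_nil (cmap : PySem.Dict (Int × Int) (List Nat)) (cells : List Cell4)
    (fuel : Nat) (seen : PySem.Set Nat) (group : List Cell4) :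
    floodB cmap cells fuel [] seen group = (group, seen) := by
  cases fuel <;> rfl

theorem floodB_cons (cmap : PySem.Dict (Int × Int) (List Nat)) (cells : List Cell4)
    (fuel : Nat) (i : Nat) (heap : List Nat) (seen : PySem.Set Nat) (group : List Cell4) :
    floodB cmap cells (fuel + 1) (i :: heap) seen group =
      floodB cmap cells fuel (pushAll cmap (cellAt cells i) (heap, seen)).1
        (pushAll cmap (cellAt cells i) (heap, seen)).2 (group ++ [cellAt cells i]) := rfl

theorem outerB_nil (cmap : PySem.Dict (Int × Int) (List Nat)) (cells : List Cell4)
    (seen : PySem.Set Nat) (groups : List (List Cell4)) :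
    outerB cmap cells [] seen groups = groups := rfl

theorem outerB_skip {cmap : PySem.Dict (Int × Int) (List Nat)} {cells : List Cell4}
    {s : Nat} {ss : List Nat} {seen : PySem.Set Nat} {groups : List (List Cell4)}
    (h : PySem.Set.contains seen s = true) :
    outerB cmap cells (s :: ss) seen groups = outerB cmap cells ss seen groups := by
  have hm : s ∈ seen := (set_contains_iff _ _).1 h
  simp [outerB, set_contains_iff, hm]

theorem outerB_seed {cmap : PySem.Dict (Int × Int) (List Nat)} {cells : List Cell4}
    {s : Nat} {ss : List Nat} {seen : PySem.Set Nat} {groups : List (List Cell4)}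
    (h : PySem.Set.contains seen s = false) :
    outerB cmap cells (s :: ss) seen groups =
      outerB cmap cells ss
        (floodB cmap cells cells.length [s] (PySem.Set.add seen s) []).2
        (groups ++ [(floodB cmap cells cells.length [s] (PySem.Set.add seen s) []).1]) := by
  have hm : s ∉ seen := fun m => by
    rw [(set_contains_iff _ _).2 m] at h
    cases h
  simp [outerB, set_contains_iff, hm]

-- ---- the flood-fill / greedy-growth simulation ----

theorem grow_base (cells : List Cell4) (fuel : Nat) (unvis : List Nat)
    (U : PySem.Set (Int × Int)) (cur group : List Cell4) (seen : PySem.Set Nat)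
    (hfil : unvis.filter (fun j => sharesCorner U (cellAt cells j)) = [])
    (hseen : ∀ x : Nat, PySem.Set.contains seen x = true ↔
      (x < cells.length ∧ (x ∉ unvis ∨ sharesCorner U (cellAt cells x) = true)))
    (hcur : cur ≠ []) :
    floodB (cmapB cells) cells fuel (unvis.filter (fun j => sharesCorner U (cellAt cells j))) seen group =
        (group ++ [], seen) ∧
    (∀ tables, finishA (loopA (unvis.map (cellAt cells)) cur U tables) =
      finishA (loopA (unvis.map (cellAt cells)) [] PySem.Set.empty (tables ++ [cur ++ []]))) ∧
    (∀ x : Nat, PySem.Set.contains seen x = true ↔ (x < cells.length ∧ x ∉ unvis)) := by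
  have hnone : ∀ j ∈ unvis, sharesCorner U (cellAt cells j) = false := by
    intro j hj
    have := List.filter_eq_nil_iff.1 hfil j hj
    simpa using this
  refine ⟨by rw [hfil, floodB_nil]; simp, ?_, ?_⟩
  · intro tables
    cases hu : unvis with
    | nil =>
      simp only [List.map_nil, loopA_nil, List.append_nil]
      simp [finishA, hcur]
    | cons u us =>
      simp only [List.map_cons]
      rw [loopA_none hcur]
      · simp
      · rw [findNbrA_zero, List.findIdx?_eq_none_iff]
        intro cc hcc
        rw [← List.map_cons, ← hu] at hcc
        obtain ⟨j, hj, rfl⟩ := List.mem_map.1 hcc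
        exact hnone j (hu ▸ hj)
  · intro x
    rw [hseen x]
    constructor
    · rintro ⟨h1, h2 | h2⟩
      · exact ⟨h1, h2⟩
      · refine ⟨h1, fun hmem => ?_⟩
        rw [hnone x hmem] at h2; cases h2
    · rintro ⟨h1, h2⟩
      exact ⟨h1, Or.inl h2⟩

theorem grow_sim (cells : List Cell4) :
    ∀ (fuel : Nat) (unvis : List Nat) (U : PySem.Set (Int × Int)) (cur group : List Cell4)
      (seen : PySem.Set Nat),
      unvis.Pairwise (· < ·) →
      (∀ j ∈ unvis, j < cells.length) →
      unvis.length ≤ fuel →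
      (∀ x : Nat, PySem.Set.contains seen x = true ↔
        (x < cells.length ∧ (x ∉ unvis ∨ sharesCorner U (cellAt cells x) = true))) →
      cur ≠ [] →
      ∃ (tail : List Cell4) (unvis' : List Nat) (seen' : PySem.Set Nat),
        floodB (cmapB cells) cells fuel
            (unvis.filter (fun j => sharesCorner U (cellAt cells j))) seen group =
          (group ++ tail, seen') ∧
        (∀ tables, finishA (loopA (unvis.map (cellAt cells)) cur U tables) =
          finishA (loopA (unvis'.map (cellAt cells)) [] PySem.Set.empty (tables ++ [cur ++ tail]))) ∧
        unvis'.Pairwise (· < ·) ∧ (∀ j ∈ unvis', j ∈ unvis) ∧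
        (∀ x : Nat, PySem.Set.contains seen' x = true ↔ (x < cells.length ∧ x ∉ unvis')) := by
  intro fuel
  induction fuel with
  | zero =>
    intro unvis U cur group seen hp hlt hlen hseen hcur
    have hu : unvis = [] := List.length_eq_zero_iff.1 (Nat.le_zero.1 hlen)
    subst hu
    obtain ⟨hA, hB, hC⟩ := grow_base cells 0 [] U cur group seen (by simp) hseen hcur
    exact ⟨[], [], seen, hA, hB, by simp, by simp, hC⟩
  | succ fuel ih =>
    intro unvis U cur group seen hp hlt hlen hseen hcur
    cases hfil : unvis.filter (fun j => sharesCorner U (cellAt cells j)) with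
    | nil =>
      obtain ⟨hA, hB, hC⟩ := grow_base cells (fuel + 1) unvis U cur group seen hfil hseen hcur
      refine ⟨[], unvis, seen, ?_, hB, hp, fun j h => h, hC⟩
      rw [← hfil]
      exact hA
    | cons j hs =>
      obtain ⟨p, hfind, hplen, hgetj, herase⟩ := filter_cons_first hfil
      have hjfil : j ∈ unvis.filter (fun j => sharesCorner U (cellAt cells j)) := by
        rw [hfil]; exact List.mem_cons_self
      have hjU : sharesCorner U (cellAt cells j) = true := (List.mem_filter.1 hjfil).2
      have hjmem : j ∈ unvis := (List.mem_filter.1 hjfil).1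
      have hjn : j < cells.length := hlt j hjmem
      set c : Cell4 := cellAt cells j with hc
      set U' : PySem.Set (Int × Int) := PySem.Set.union U (PySem.Set.ofList (corners4 c)) with hU'def
      set unvis' : List Nat := unvis.eraseIdx p with hunvis'
      have hp' : unvis'.Pairwise (· < ·) := List.Pairwise.sublist (List.eraseIdx_sublist unvis p) hp
      have hsub' : ∀ x ∈ unvis', x ∈ unvis := fun x hx => (List.eraseIdx_sublist unvis p).subset hx
      have hlt' : ∀ x ∈ unvis', x < cells.length := fun x hx => hlt x (hsub' x hx)
      have hmem' : ∀ x, x ∈ unvis' ↔ (x ∈ unvis ∧ x ≠ j) := by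
        intro x
        rw [hunvis', mem_eraseIdx_sorted hp hplen, hgetj]
      have hlen' : unvis'.length ≤ fuel := by
        rw [hunvis', List.length_eraseIdx]
        simp only [hplen, if_true]
        omega
      have hhs_pairwise : hs.Pairwise (· < ·) := by
        rw [← herase]
        exact List.Pairwise.filter _ hp'
      have hhs_mem : ∀ x, x ∈ hs ↔ (x ∈ unvis' ∧ sharesCorner U (cellAt cells x) = true) := by
        intro x
        rw [← herase, List.mem_filter]
      have hsubseen : ∀ x ∈ hs, PySem.Set.contains seen x = true := by
        intro x hx
        obtain ⟨hx1, hx2⟩ := (hhs_mem x).1 hx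
        exact (hseen x).2 ⟨hlt' x hx1, Or.inr hx2⟩
      obtain ⟨B1, B2, B3, B4⟩ :=
        pushFold ((corners4 c).flatMap (fun q => PySem.Dict.getD (cmapB cells) q [])) hs seen
          hhs_pairwise hsubseen
      have hflat : ∀ x, x ∈ (corners4 c).flatMap (fun q => PySem.Dict.getD (cmapB cells) q []) ↔
          (x < cells.length ∧ sharesCorner (PySem.Set.ofList (corners4 c)) (cellAt cells x) = true) := by
        intro x
        rw [List.mem_flatMap]
        constructor
        · rintro ⟨q, hq, hxq⟩
          obtain ⟨hx1, hx2⟩ := (mem_getD_cmap cells x q).1 hxq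
          exact ⟨hx1, (sharesCorner_iff _ _).2 ⟨q, hx2, (PySem.Set.mem_ofList _ _).2 hq⟩⟩
        · rintro ⟨hx1, hx2⟩
          obtain ⟨q, hq1, hq2⟩ := (sharesCorner_iff _ _).1 hx2
          exact ⟨q, (PySem.Set.mem_ofList _ _).1 hq2, (mem_getD_cmap cells x q).2 ⟨hx1, hq1⟩⟩
      have hU'iff : ∀ x, sharesCorner U' (cellAt cells x) = true ↔
          (sharesCorner U (cellAt cells x) = true ∨
            sharesCorner (PySem.Set.ofList (corners4 c)) (cellAt cells x) = true) := by
        intro x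
        rw [hU'def, sharesCorner_union_iff]
      set H2 := (((corners4 c).flatMap (fun q => PySem.Dict.getD (cmapB cells) q [])).foldl pushOne
        (hs, seen)).1 with hH2def
      set S2 := (((corners4 c).flatMap (fun q => PySem.Dict.getD (cmapB cells) q [])).foldl pushOne
        (hs, seen)).2 with hS2def
      have hH2 : H2 = unvis'.filter (fun x => sharesCorner U' (cellAt cells x)) := by
        apply eq_of_sorted_lt B1 (List.Pairwise.filter _ hp')
        intro x
        rw [B2 x, List.mem_filter]
        constructor
        · rintro (h1 | ⟨h1, h2⟩)
          · obtain ⟨hx1, hx2⟩ := (hhs_mem x).1 h1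
            exact ⟨hx1, (hU'iff x).2 (Or.inl hx2)⟩
          · obtain ⟨hx1, hx2⟩ := (hflat x).1 h1
            have hxU : sharesCorner U (cellAt cells x) = false := by
              rw [Bool.eq_false_iff]
              intro hcon
              have := (hseen x).2 ⟨hx1, Or.inr hcon⟩
              rw [h2] at this; cases this
            have hxunvis : x ∈ unvis := by
              by_contra hnot
              have := (hseen x).2 ⟨hx1, Or.inl hnot⟩
              rw [h2] at this; cases this
            have hxj : x ≠ j := by
              rintro rfl
              rw [hjU] at hxU; cases hxU
            exact ⟨(hmem' x).2 ⟨hxunvis, hxj⟩, (hU'iff x).2 (Or.inr hx2)⟩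
        · rintro ⟨h1, h2⟩
          rcases (hU'iff x).1 h2 with h3 | h3
          · exact Or.inl ((hhs_mem x).2 ⟨h1, h3⟩)
          · by_cases hxU : sharesCorner U (cellAt cells x) = true
            · exact Or.inl ((hhs_mem x).2 ⟨h1, hxU⟩)
            · refine Or.inr ⟨(hflat x).2 ⟨hlt' x h1, h3⟩, ?_⟩
              rw [Bool.eq_false_iff]
              intro hcon
              rcases ((hseen x).1 hcon).2 with h4 | h4
              · exact h4 (hsub' x h1)
              · exact hxU h4
      have hS2char : ∀ x : Nat, PySem.Set.contains S2 x = true ↔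
          (x < cells.length ∧ (x ∉ unvis' ∨ sharesCorner U' (cellAt cells x) = true)) := by
        intro x
        rw [B3 x, hseen x, hflat x]
        constructor
        · rintro (⟨h1, h2 | h2⟩ | ⟨h1, h2⟩)
          · refine ⟨h1, Or.inl fun hcon => h2 (hsub' x hcon)⟩
          · exact ⟨h1, Or.inr ((hU'iff x).2 (Or.inl h2))⟩
          · exact ⟨h1, Or.inr ((hU'iff x).2 (Or.inr h2))⟩
        · rintro ⟨h1, h2 | h2⟩
          · by_cases hxj : x = j
            · subst hxj
              exact Or.inl ⟨h1, Or.inr hjU⟩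
            · by_cases hxu : x ∈ unvis
              · exact absurd ((hmem' x).2 ⟨hxu, hxj⟩) h2
              · exact Or.inl ⟨h1, Or.inl hxu⟩
          · rcases (hU'iff x).1 h2 with h3 | h3
            · exact Or.inl ⟨h1, Or.inr h3⟩
            · exact Or.inr ⟨h1, h3⟩
      obtain ⟨tail', unvis'', seen'', hflood, hcont, hg1, hg2, hg3⟩ :=
        ih unvis' U' (cur ++ [c]) (group ++ [c]) S2 hp' hlt' hlen' hS2char (by simp)
      refine ⟨c :: tail', unvis'', seen'', ?_, ?_, hg1, fun x hx => hsub' x (hg2 x hx), hg3⟩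
      · rw [floodB_cons, pushAll_flat, ← hc, ← hH2def, ← hS2def, hH2, hflood]
        simp
      · intro tables
        obtain ⟨u, us, hu⟩ : ∃ u us, unvis = u :: us :=
          List.exists_cons_of_ne_nil (List.ne_nil_of_mem hjmem)
        have hA : loopA (unvis.map (cellAt cells)) cur U tables =
            loopA (unvis'.map (cellAt cells)) (cur ++ [c]) U' tables := by
          have hplen' : p < (u :: us).length := by rw [← hu]; exact hplen
          have hfind' : List.findIdx? (fun j => sharesCorner U (cellAt cells j)) (u :: us) = some p := by
            rw [← hu]; exact hfind
          have hgetj' : (u :: us)[p]'hplen' = j := by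
            simp only [hu] at hgetj
            exact hgetj
          have hfA : findNbrA U (cellAt cells u :: us.map (cellAt cells)) 0 = some p := by
            rw [← List.map_cons, findNbrA_zero, List.findIdx?_map]
            exact hfind'
          have hplenm : p < ((u :: us).map (cellAt cells)).length := by simpa using hplen'
          have hpopA : PySem.List.pop? (cellAt cells u :: us.map (cellAt cells)) (p : Int) =
              some (c, ((u :: us).eraseIdx p).map (cellAt cells)) := by
            rw [← List.map_cons, PySem.List.pop?_natCast _ _ hplenm, List.eraseIdx_map]
            simp only [List.getElem_map, hgetj', hc]
          rw [hu]
          simp only [List.map_cons]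
          rw [loopA_found hcur hfA hpopA, hunvis', hu, hU'def, hc]
        rw [hA, hcont tables]
        have harr : (cur ++ [c]) ++ tail' = cur ++ (c :: tail') := by simp
        rw [harr]

-- ---- the outer seed loop simulation ----

theorem outer_sim (cells : List Cell4) :
    ∀ (m k : Nat) (unvis : List Nat) (seen : PySem.Set Nat) (groups : List (List Cell4))
      (U : PySem.Set (Int × Int)),
      cells.length - k = m →
      unvis.Pairwise (· < ·) →
      (∀ j ∈ unvis, k ≤ j ∧ j < cells.length) →
      (∀ x : Nat, PySem.Set.contains seen x = true ↔ (x < cells.length ∧ x ∉ unvis)) →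
      outerB (cmapB cells) cells ((List.range cells.length).drop k) seen groups =
        finishA (loopA (unvis.map (cellAt cells)) [] U groups) := by
  intro m
  induction m with
  | zero =>
    intro k unvis seen groups U hm hp hrange hseen
    have hk : cells.length ≤ k := by omega
    have hdrop : (List.range cells.length).drop k = [] :=
      List.drop_eq_nil_of_le (by simpa using hk)
    have hu : unvis = [] := by
      rw [List.eq_nil_iff_forall_not_mem]
      intro j hj
      have := hrange j hj
      omega
    rw [hdrop, outerB_nil, hu]
    simp [loopA_nil, finishA]
  | succ m ih =>
    intro k unvis seen groups U hm hp hrange hseen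
    have hk : k < cells.length := by omega
    have hdrop : (List.range cells.length).drop k = k :: (List.range cells.length).drop (k + 1) := by
      rw [← List.getElem_cons_drop (by simpa using hk)]
      congr 1
      simp
    rw [hdrop]
    by_cases hcont : PySem.Set.contains seen k = true
    · have hknot : k ∉ unvis := ((hseen k).1 hcont).2
      rw [outerB_skip hcont]
      apply ih (k + 1) unvis seen groups U (by omega) hp ?_ hseen
      intro j hj
      have h1 := hrange j hj
      have h2 : j ≠ k := fun h => hknot (h ▸ hj)
      omega
    · replace hcont : PySem.Set.contains seen k = false := by
        rw [Bool.eq_false_iff]; exact hcont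
      have hkmem : k ∈ unvis := by
        by_contra hnot
        rw [(hseen k).2 ⟨hk, hnot⟩] at hcont
        cases hcont
      obtain ⟨us, hu⟩ : ∃ us, unvis = k :: us := by
        cases hu : unvis with
        | nil => rw [hu] at hkmem; cases hkmem
        | cons u us =>
          rw [hu] at hkmem hp hrange
          rcases List.mem_cons.1 hkmem with rfl | hkus
          · exact ⟨us, rfl⟩
          · have h1 : u < k := (List.pairwise_cons.1 hp).1 k hkus
            have h2 : k ≤ u := (hrange u List.mem_cons_self).1
            omega
      subst hu
      have hpus : us.Pairwise (· < ·) := (List.pairwise_cons.1 hp).2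
      have hkus : ∀ x ∈ us, k < x := (List.pairwise_cons.1 hp).1
      have hltus : ∀ j ∈ us, j < cells.length := fun j hj => (hrange j (List.mem_cons_of_mem _ hj)).2
      set c : Cell4 := cellAt cells k with hc
      set U0 : PySem.Set (Int × Int) := PySem.Set.ofList (corners4 c) with hU0
      have hnodup : ((k :: us) : List Nat).Nodup := hp.imp ne_of_lt
      have hlenle : (k :: us).length ≤ cells.length := by
        have hsub : (k :: us) ⊆ List.range cells.length := by
          intro j hj
          rw [List.mem_range]
          exact (hrange j hj).2
        have := (List.subperm_of_subset hnodup hsub).length_le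
        simpa using this
      obtain ⟨f', hf'⟩ : ∃ f', cells.length = f' + 1 := ⟨cells.length - 1, by omega⟩
      rw [outerB_seed hcont, hf', floodB_cons]
      obtain ⟨B1, B2, B3, B4⟩ :=
        pushFold ((corners4 c).flatMap (fun q => PySem.Dict.getD (cmapB cells) q []))
          [] (PySem.Set.add seen k) (by simp) (by simp)
      have hflat : ∀ x, x ∈ (corners4 c).flatMap (fun q => PySem.Dict.getD (cmapB cells) q []) ↔
          (x < cells.length ∧ sharesCorner U0 (cellAt cells x) = true) := by
        intro x
        rw [List.mem_flatMap]
        constructor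
        · rintro ⟨q, hq, hxq⟩
          obtain ⟨hx1, hx2⟩ := (mem_getD_cmap cells x q).1 hxq
          exact ⟨hx1, (sharesCorner_iff _ _).2 ⟨q, hx2, (PySem.Set.mem_ofList _ _).2 hq⟩⟩
        · rintro ⟨hx1, hx2⟩
          obtain ⟨q, hq1, hq2⟩ := (sharesCorner_iff _ _).1 hx2
          exact ⟨q, (PySem.Set.mem_ofList _ _).1 hq2, (mem_getD_cmap cells x q).2 ⟨hx1, hq1⟩⟩
      set H1 := (((corners4 c).flatMap (fun q => PySem.Dict.getD (cmapB cells) q [])).foldl pushOne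
        ([], PySem.Set.add seen k)).1 with hH1def
      set S1 := (((corners4 c).flatMap (fun q => PySem.Dict.getD (cmapB cells) q [])).foldl pushOne
        ([], PySem.Set.add seen k)).2 with hS1def
      have hH1 : H1 = us.filter (fun x => sharesCorner U0 (cellAt cells x)) := by
        apply eq_of_sorted_lt B1 (List.Pairwise.filter _ hpus)
        intro x
        rw [B2 x, List.mem_filter]
        simp only [List.not_mem_nil, false_or]
        constructor
        · rintro ⟨h1, h2⟩
          obtain ⟨hx1, hx2⟩ := (hflat x).1 h1
          have h2' : ¬(x = k ∨ PySem.Set.contains seen x = true) := by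
            intro hor
            have := (contains_add_iff seen k x).2 hor
            rw [h2] at this; cases this
          have hxk : x ≠ k := fun he => h2' (Or.inl he)
          have hxseen : PySem.Set.contains seen x ≠ true := fun he => h2' (Or.inr he)
          have hxunvis : x ∈ (k :: us) := by
            by_contra hnot
            exact hxseen ((hseen x).2 ⟨hx1, hnot⟩)
          rcases List.mem_cons.1 hxunvis with h3 | hxus
          · exact absurd h3 hxk
          · exact ⟨hxus, hx2⟩
        · rintro ⟨h1, h2⟩
          refine ⟨(hflat x).2 ⟨hltus x h1, h2⟩, ?_⟩
          rw [Bool.eq_false_iff]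
          intro hcon
          rcases (contains_add_iff seen k x).1 hcon with h3 | h3
          · subst h3
            exact absurd (hkus _ h1) (lt_irrefl _)
          · exact ((hseen x).1 h3).2 (List.mem_cons_of_mem _ h1)
      have hS1char : ∀ x : Nat, PySem.Set.contains S1 x = true ↔
          (x < cells.length ∧ (x ∉ us ∨ sharesCorner U0 (cellAt cells x) = true)) := by
        intro x
        rw [B3 x, contains_add_iff, hseen x, hflat x]
        constructor
        · rintro ((rfl | ⟨h1, h2⟩) | ⟨h1, h2⟩)
          · refine ⟨hk, Or.inl fun hcon => ?_⟩
            exact absurd (hkus x hcon) (lt_irrefl x)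
          · exact ⟨h1, Or.inl fun hcon => h2 (List.mem_cons_of_mem _ hcon)⟩
          · exact ⟨h1, Or.inr h2⟩
        · rintro ⟨h1, h2 | h2⟩
          · by_cases hxk : x = k
            · exact Or.inl (Or.inl hxk)
            · refine Or.inl (Or.inr ⟨h1, fun hcon => ?_⟩)
              rcases List.mem_cons.1 hcon with h3 | h3
              · exact hxk h3
              · exact h2 h3
          · exact Or.inr ⟨h1, h2⟩
      have hlenus : us.length ≤ f' := by
        have hl : (k :: us).length = us.length + 1 := by simp
        omega
      obtain ⟨tail, unvis'', seen'', hflood, hcont2, hg1, hg2, hg3⟩ :=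
        grow_sim cells f' us U0 [c] [c] S1 hpus hltus hlenus hS1char (by simp)
      rw [pushAll_flat, ← hc, ← hH1def, ← hS1def, hH1]
      have hgrp : ([] : List Cell4) ++ [cellAt cells k] = [c] := by rw [← hc]; simp
      rw [hgrp, hflood]
      have hroute : outerB (cmapB cells) cells ((List.range cells.length).drop (k + 1)) seen''
          (groups ++ [[c] ++ tail]) =
          finishA (loopA (unvis''.map (cellAt cells)) [] PySem.Set.empty (groups ++ [[c] ++ tail])) := by
        apply ih (k + 1) unvis'' seen'' _ PySem.Set.empty (by omega) hg1 ?_ hg3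
        intro j hj
        have h1 := hg2 j hj
        exact ⟨hkus j h1, hltus j h1⟩
      rw [← hf', hroute]
      rw [List.map_cons, loopA_seed, ← hc, ← hU0]
      rw [hcont2 groups]

-- ---- assembling the two ports ----

theorem map_cellAt_range (cells : List Cell4) :
    (List.range cells.length).map (cellAt cells) = cells := by
  apply List.ext_getElem
  · simp
  · intro i h1 h2
    simp [cellAt, List.getD_eq_getElem?_getD, List.getElem?_eq_getElem h2]

theorem xCoordsA_eq (t : List Cell4) :
    xCoordsA t = PySem.Set.ofList (t.map (fun c => c.1)) := by
  unfold xCoordsA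
  rw [PySem.Set.ofList_eq_foldl, List.foldl_map]
  rfl

theorem goodB_iff_not_bad (t : List Cell4) :
    goodB t = true ↔ ¬(t.length < 2 ∨ PySem.Set.len (xCoordsA t) < 2) := by
  rw [xCoordsA_eq]
  unfold goodB
  simp only [Bool.and_eq_true, decide_eq_true_eq, PySem.Set.len]
  constructor
  · rintro ⟨h1, h2⟩ h3
    rcases h3 with h3 | h3
    · omega
    · omega
  · intro h
    have h1 : ¬(t.length < 2) := fun a => h (Or.inl a)
    have h2 : ¬(((PySem.Set.ofList (t.map (fun c => c.1))).length : Int) < 2) :=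
      fun a => h (Or.inr a)
    constructor
    · omega
    · omega

theorem filterA_eq :
    ∀ (i : Nat) (ts : List (List Cell4)), i ≤ ts.length →
      filterA ts i = (ts.take i).filter goodB ++ ts.drop i := by
  intro i
  induction i with
  | zero => intro ts h; simp [filterA]
  | succ i ih =>
    intro ts h
    have hi : i < ts.length := by omega
    have htgetD : ts.getD i [] = ts[i] := by
      simp [List.getD_eq_getElem?_getD, List.getElem?_eq_getElem hi]
    have htake : ts.take (i + 1) = ts.take i ++ [ts[i]] := by
      rw [List.take_succ, List.getElem?_eq_getElem hi]
      rfl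
    have hlentake : (ts.take i).length = i := by
      simp [Nat.le_of_lt hi]
    by_cases hbad : ts[i].length < 2 ∨ PySem.Set.len (xCoordsA ts[i]) < 2
    · have hstep : filterA ts (i + 1) = filterA (ts.eraseIdx i) i := by
        simp only [filterA, htgetD]
        rcases hbad with hb | hb
        · rw [if_pos hb]
        · by_cases hb1 : ts[i].length < 2
          · rw [if_pos hb1]
          · rw [if_neg hb1, if_pos hb]
      have hgood : goodB ts[i] = false := by
        rw [Bool.eq_false_iff]
        intro hcon
        exact (goodB_iff_not_bad _).1 hcon hbad
      have hlenerase : i ≤ (ts.eraseIdx i).length := by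
        rw [List.length_eraseIdx]
        simp only [hi, if_true]
        omega
      rw [hstep, ih _ hlenerase, List.eraseIdx_eq_take_drop_succ]
      have e1 : (ts.take i ++ ts.drop (i + 1)).take i = ts.take i := by
        rw [List.take_append]
        simp [hlentake]
      have e2 : (ts.take i ++ ts.drop (i + 1)).drop i = ts.drop (i + 1) := by
        rw [List.drop_append]
        simp [hlentake]
      rw [e1, e2, htake, List.filter_append]
      have hfilt : List.filter goodB [ts[i]] = [] := by simp [hgood]
      rw [hfilt, List.append_nil]
    · have hstep : filterA ts (i + 1) = filterA ts i := by
        simp only [filterA, htgetD]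
        push_neg at hbad
        rw [if_neg (by omega), if_neg (by push_neg; exact hbad.2)]
      have hgood : goodB ts[i] = true := (goodB_iff_not_bad _).2 hbad
      rw [hstep, ih _ (by omega), htake, List.filter_append, List.filter_cons_of_pos hgood]
      simp only [List.filter_nil]
      rw [← List.getElem_cons_drop hi]
      simp

theorem cells_to_tables_equal : ∀ (page : Int) (cells : List (Int × Int × Int × Int)),
    cells_to_tables page cells = cells_to_tables_alt page cells := by
  intro page cells
  have hg : outerB (cmapB cells) cells (List.range cells.length) PySem.Set.empty [] =
      finishA (loopA cells [] PySem.Set.empty []) := by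
    have h := outer_sim cells cells.length 0 (List.range cells.length) PySem.Set.empty []
      PySem.Set.empty (by omega) List.pairwise_lt_range
      (fun j hj => ⟨Nat.zero_le j, List.mem_range.1 hj⟩)
      (fun x => by rw [contains_empty]; simp)
    rw [List.drop_zero, map_cellAt_range] at h
    exact h
  show PySem.List.sorted2
      (filterA (finishA (loopA cells [] PySem.Set.empty []))
        (finishA (loopA cells [] PySem.Set.empty [])).length) keyY keyX =
    PySem.List.sorted2
      ((outerB (cmapB cells) cells (List.range cells.length) PySem.Set.empty []).filter goodB)
      keyY keyX
  rw [hg, filterA_eq _ _ le_rfl]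
  simp

-- ===== VERDICT (by name: the statement is the Claim_ definition above) =====
theorem cells_to_tables_spec : Claim_equal_cells_to_tables := by
  intro page cells _
  unfold Spec_cells_to_tables
  exact cells_to_tables_equal page cells
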